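-- pv_equiv track=rewrite | github.com/dzeder/grilling-chipmunks | skills/docs/diff-summarizer/skill.py | count_changes
-- ===== SOURCE A (Python) =====
-- def count_changes(diff_text: str) -> tuple[int, int, int]:
--     """Count files changed, lines added, and lines removed."""
--     files = set()
--     added = 0
--     removed = 0
--     for line in diff_text.splitlines():
--         if line.startswith("diff --git"):
--             parts = line.split()
--             if len(parts) >= 3:
--                 files.add(parts[2])
--         elif line.startswith("+") and not line.startswith("+++"):
--             added += 1
--         elif line.startswith("-") and not line.startswith("---"):
--             removed += 1
--     return len(files), added, removed
-- ===== SOURCE B (Python) =====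
-- def count_changes(diff_text: str) -> tuple[int, int, int]:
--     """Count files changed, lines added, and lines removed."""
--     f, a, r = _solve(diff_text.splitlines())
--     return len(f), a, r
--
--
-- def _line_triple(line):
--     """Classify a single line as a (file-name set, added, removed) triple."""
--     if line.startswith("diff --git"):
--         parts = line.split()
--         if len(parts) >= 3:
--             return {parts[2]}, 0, 0
--         return set(), 0, 0
--     if line.startswith("+") and not line.startswith("+++"):
--         return set(), 1, 0
--     if line.startswith("-") and not line.startswith("---"):
--         return set(), 0, 1
--     return set(), 0, 0
--
--
-- def _solve(lines):
--     """Divide and conquer: combine the halves' triples with (union, +, +)."""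
--     if not lines:
--         return set(), 0, 0
--     if len(lines) == 1:
--         return _line_triple(lines[0])
--     mid = len(lines) // 2
--     f1, a1, r1 = _solve(lines[:mid])
--     f2, a2, r2 = _solve(lines[mid:])
--     return f1 | f2, a1 + a2, r1 + r2
-- ===== Notes on version B (the rewrite author's own statement) =====
-- stated objective: alternative
-- what changed: A's single linear loop with mutable accumulators is replaced by a divide-and-conquer fold: each line is mapped to a (file-set, added, removed) triple and halves are combined recursively with the monoid (set-union, +, +).
import Mathlib
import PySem

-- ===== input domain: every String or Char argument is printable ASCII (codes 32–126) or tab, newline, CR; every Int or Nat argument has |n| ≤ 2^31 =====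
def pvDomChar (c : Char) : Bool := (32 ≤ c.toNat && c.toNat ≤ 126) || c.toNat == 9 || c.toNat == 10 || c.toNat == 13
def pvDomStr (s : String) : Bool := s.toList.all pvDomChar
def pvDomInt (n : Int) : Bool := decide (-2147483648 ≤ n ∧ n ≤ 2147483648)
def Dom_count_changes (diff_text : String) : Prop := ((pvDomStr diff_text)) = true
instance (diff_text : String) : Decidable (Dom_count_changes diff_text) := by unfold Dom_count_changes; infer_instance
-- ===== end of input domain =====

-- B replaces A's single linear loop with mutable accumulators by a divide-and-conquer
-- fold: each line maps to a (file-set, added, removed) triple, halves combine with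
-- (set-union, +, +); objective: alternative algorithm, same result.

-- ===== PORT A =====
-- loop body of A's single for-loop, on the state (files, added, removed)
def pvStepA (st : PySem.Set String × Int × Int) (line : String) : PySem.Set String × Int × Int :=
  if PySem.Str.startswith line "diff --git" then
    let parts := PySem.Str.split₀ line
    if 3 ≤ parts.length then (PySem.Set.add st.1 (PySem.List.pyGetD parts 2 ""), st.2.1, st.2.2)
    else st
  else if PySem.Str.startswith line "+" && !PySem.Str.startswith line "+++" then
    (st.1, st.2.1 + 1, st.2.2)
  else if PySem.Str.startswith line "-" && !PySem.Str.startswith line "---" then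
    (st.1, st.2.1, st.2.2 + 1)
  else st

def count_changes (diff_text : String) : Int × Int × Int :=
  let r := (PySem.Str.splitlines diff_text).foldl pvStepA (PySem.Set.empty, 0, 0)
  (PySem.Set.len r.1, r.2.1, r.2.2)

-- ===== PORT B =====
-- _line_triple: classify a single line as a (file-name set, added, removed) triple
def pvLineTriple (line : String) : PySem.Set String × Int × Int :=
  if PySem.Str.startswith line "diff --git" then
    let parts := PySem.Str.split₀ line
    if 3 ≤ parts.length then (PySem.Set.ofList [PySem.List.pyGetD parts 2 ""], 0, 0)
    else (PySem.Set.empty, 0, 0)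
  else if PySem.Str.startswith line "+" && !PySem.Str.startswith line "+++" then
    (PySem.Set.empty, 1, 0)
  else if PySem.Str.startswith line "-" && !PySem.Str.startswith line "---" then
    (PySem.Set.empty, 0, 1)
  else (PySem.Set.empty, 0, 0)

-- _solve: divide and conquer, combining halves with (union, +, +)
def pvSolve (lines : List String) : PySem.Set String × Int × Int :=
  match lines with
  | [] => (PySem.Set.empty, 0, 0)
  | [line] => pvLineTriple line
  | a :: b :: rest =>
    let mid := (a :: b :: rest).length / 2
    let r1 := pvSolve ((a :: b :: rest).take mid)
    let r2 := pvSolve ((a :: b :: rest).drop mid)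
    (PySem.Set.union r1.1 r2.1, r1.2.1 + r2.2.1, r1.2.2 + r2.2.2)
termination_by lines.length
decreasing_by
  · simp; omega
  · simp; omega

def count_changes_alt (diff_text : String) : Int × Int × Int :=
  let r := pvSolve (PySem.Str.splitlines diff_text)
  (PySem.Set.len r.1, r.2.1, r.2.2)

-- ===== PRECONDITION & SPEC =====
def Spec_count_changes (diff_text : String) (out : Int × Int × Int) : Prop := out = count_changes_alt diff_text
instance (diff_text : String) (out : Int × Int × Int) : Decidable (Spec_count_changes diff_text out) := by unfold Spec_count_changes; infer_instance

-- ===== CLAIM (what is proved, stated in full; the proofs are below) =====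
def Claim_equal_count_changes : Prop := ∀ (diff_text : String), Dom_count_changes diff_text → Spec_count_changes diff_text (count_changes diff_text)

-- ===== LEMMAS AND PROOFS =====

-- the list of file names a run of lines contributes, in encounter order
def pvFilesOf (lines : List String) : List String :=
  ((lines.filter (fun line => PySem.Str.startswith line "diff --git")).map
      PySem.Str.split₀).filterMap
    (fun parts => if 3 ≤ parts.length then some (PySem.List.pyGetD parts 2 "") else none)

def pvPlusP (line : String) : Bool :=
  PySem.Str.startswith line "+" && !PySem.Str.startswith line "+++"
def pvMinusP (line : String) : Bool :=
  PySem.Str.startswith line "-" && !PySem.Str.startswith line "---"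

-- two cons-headed character lists with different heads cannot both be prefixes
theorem pvPfx_false {l : List Char} {a b : Char} {p q : List Char}
    (h : List.isPrefixOf (a :: p) l = true) (hab : a ≠ b) :
    List.isPrefixOf (b :: q) l = false := by
  cases l with
  | nil => simp [List.isPrefixOf] at h
  | cons c t =>
    simp [List.isPrefixOf] at h ⊢
    intro hb
    exact absurd (h.1 ▸ hb) (fun e => hab e.symm)

theorem pvDg_not_plus (line : String) (h : PySem.Str.startswith line "diff --git" = true) :
    PySem.Str.startswith line "+" = false := by
  rw [PySem.Str.startswith_eq] at h ⊢
  exact pvPfx_false (p := "iff --git".toList) h (by decide)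

theorem pvDg_not_minus (line : String) (h : PySem.Str.startswith line "diff --git" = true) :
    PySem.Str.startswith line "-" = false := by
  rw [PySem.Str.startswith_eq] at h ⊢
  exact pvPfx_false (p := "iff --git".toList) h (by decide)

theorem pvPlus_not_minus (line : String) (h : PySem.Str.startswith line "+" = true) :
    PySem.Str.startswith line "-" = false := by
  rw [PySem.Str.startswith_eq] at h ⊢
  exact pvPfx_false (p := ([] : List Char)) h (by decide)

-- A's loop, characterised: fold of pvStepA = (update with pvFilesOf, counts of +/- lines)
theorem pvLoop (lines : List String) (s : PySem.Set String) (a r : Int) :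
    lines.foldl pvStepA (s, a, r) =
      (PySem.Set.update s (pvFilesOf lines),
       a + (lines.countP pvPlusP : Int),
       r + (lines.countP pvMinusP : Int)) := by
  induction lines generalizing s a r with
  | nil => simp [PySem.Set.update, pvFilesOf]
  | cons line rest ih =>
    by_cases hdg : PySem.Str.startswith line "diff --git" = true
    · have hp := pvDg_not_plus line hdg
      have hm := pvDg_not_minus line hdg
      simp at hdg hp hm
      by_cases hlen : 3 ≤ (PySem.Str.split₀ line).length
      · simp [List.foldl, pvStepA, pvFilesOf, pvPlusP, pvMinusP, hdg, hp, hm, hlen, ih]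
      · simp [List.foldl, pvStepA, pvFilesOf, pvPlusP, pvMinusP, hdg, hp, hm, hlen, ih]
    · by_cases hpl : PySem.Str.startswith line "+" = true
      · have hm := pvPlus_not_minus line hpl
        by_cases hppp : PySem.Str.startswith line "+++" = true
        · simp at hdg hpl hppp hm
          simp [List.foldl, pvStepA, pvFilesOf, pvPlusP, pvMinusP, hdg, hpl, hppp, hm, ih]
        · simp at hdg hpl hppp hm
          simp [List.foldl, pvStepA, pvFilesOf, pvPlusP, pvMinusP, hdg, hpl, hppp, hm, ih]
          omega
      · by_cases hmi : PySem.Str.startswith line "-" = true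
        · by_cases hmmm : PySem.Str.startswith line "---" = true
          · simp at hdg hpl hmi hmmm
            simp [List.foldl, pvStepA, pvFilesOf, pvPlusP, pvMinusP, hdg, hpl, hmi, hmmm, ih]
          · simp at hdg hpl hmi hmmm
            simp [List.foldl, pvStepA, pvFilesOf, pvPlusP, pvMinusP, hdg, hpl, hmi, hmmm, ih]
            omega
        · simp at hdg hpl hmi
          simp [List.foldl, pvStepA, pvFilesOf, pvPlusP, pvMinusP, hdg, hpl, hmi, ih]

-- pvFilesOf distributes over append
theorem pvFilesOf_append (l1 l2 : List String) :
    pvFilesOf (l1 ++ l2) = pvFilesOf l1 ++ pvFilesOf l2 := by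
  simp [pvFilesOf]

-- updating by a dedup'd list is updating by the list itself
theorem pvUpdate_ofList (s : PySem.Set String) (xs : List String) :
    PySem.Set.update s (PySem.Set.ofList xs) = PySem.Set.update s xs := by
  rw [PySem.Set.update_eq_append_filter, PySem.Set.update_eq_append_filter,
    PySem.Set.ofList_ofList]

-- B's divide-and-conquer, characterised the same way
theorem pvSolve_eq (lines : List String) :
    pvSolve lines =
      (PySem.Set.ofList (pvFilesOf lines),
       (lines.countP pvPlusP : Int),
       (lines.countP pvMinusP : Int)) := by
  fun_induction pvSolve lines with
  | case1 => simp [pvFilesOf]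
  | case2 line =>
    by_cases hdg : PySem.Str.startswith line "diff --git" = true
    · have hp := pvDg_not_plus line hdg
      have hm := pvDg_not_minus line hdg
      simp at hdg hp hm
      by_cases hlen : 3 ≤ (PySem.Str.split₀ line).length
      · simp [pvLineTriple, pvFilesOf, pvPlusP, pvMinusP, hdg, hp, hm, hlen]
      · simp [pvLineTriple, pvFilesOf, pvPlusP, pvMinusP, hdg, hp, hm, hlen]
    · by_cases hpl : PySem.Str.startswith line "+" = true
      · have hm := pvPlus_not_minus line hpl
        by_cases hppp : PySem.Str.startswith line "+++" = true
        · simp at hdg hpl hppp hm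
          simp [pvLineTriple, pvFilesOf, pvPlusP, pvMinusP, hdg, hpl, hppp, hm]
        · simp at hdg hpl hppp hm
          simp [pvLineTriple, pvFilesOf, pvPlusP, pvMinusP, hdg, hpl, hppp, hm]
      · by_cases hmi : PySem.Str.startswith line "-" = true
        · by_cases hmmm : PySem.Str.startswith line "---" = true
          · simp at hdg hpl hmi hmmm
            simp [pvLineTriple, pvFilesOf, pvPlusP, pvMinusP, hdg, hpl, hmi, hmmm]
          · simp at hdg hpl hmi hmmm
            simp [pvLineTriple, pvFilesOf, pvPlusP, pvMinusP, hdg, hpl, hmi, hmmm]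
        · simp at hdg hpl hmi
          simp [pvLineTriple, pvFilesOf, pvPlusP, pvMinusP, hdg, hpl, hmi]
  | case3 =>
    rename_i a b rest mid r1 r2 ih1 ih2
    simp only [mid, r1, r2] at ih1 ih2 ⊢
    rw [ih1, ih2]
    have hsplit : (a :: b :: rest).take ((a :: b :: rest).length / 2) ++ (a :: b :: rest).drop ((a :: b :: rest).length / 2) = a :: b :: rest :=
      List.take_append_drop _ _
    conv_rhs => rw [← hsplit]
    simp only [pvFilesOf_append, List.countP_append,
      PySem.Set.union, PySem.Set.ofList_append, pvUpdate_ofList]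
    push_cast
    rfl

-- ===== VERDICT (by name: the statement is the Claim_ definition above) =====
theorem count_changes_spec : Claim_equal_count_changes := by
  intro diff_text _
  unfold Spec_count_changes count_changes count_changes_alt
  rw [pvLoop, pvSolve_eq]
  simp [PySem.Set.ofList_eq_foldl, PySem.Set.update, PySem.Set.empty, pvFilesOf]
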